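-- pv_equiv track=rewrite | github.com/yujin45/CodingTestStudy | 백준/Silver/1697. 숨바꼭질/숨바꼭질.py | bfs
-- ===== SOURCE A (Python) =====
-- from collections import deque
--
-- def bfs(n, k):
--     MAX = 100_001  # 0 ~ 100,000
--     visited = [-1] * MAX  # -1은 아직 방문 안 함
--     queue = deque()
--
--     queue.append(n)  # 시작점
--     visited[n] = 0  # 시작 위치는 0초
--
--     while queue:
--         current = queue.popleft()
--
--         # 도착하면 바로 종료
--         if current == k:
--             return visited[current]
--
--         for next_pos in [current - 1, current + 1, current * 2]:
--             if 0 <= next_pos < MAX and visited[next_pos] == -1: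
--                 visited[next_pos] = visited[current] + 1
--                 queue.append(next_pos)
-- ===== SOURCE B (Python) =====
-- def bfs(n, k):
--     # Level-synchronous BFS: frontier sets instead of a deque+distance array.
--     if n == k:
--         return 0
--     MAX = 100_001
--     visited = {n}
--     frontier = {n}
--     step = 0
--     while frontier:
--         step += 1
--         nxt = set()
--         for x in frontier:
--             for y in (x - 1, x + 1, x * 2):
--                 if 0 <= y < MAX and y not in visited:
--                     if y == k:
--                         return step
--                     visited.add(y)
--                     nxt.add(y)
--         frontier = nxt
--     return -1
-- ===== Notes on version B (the rewrite author's own statement) =====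
-- stated objective: alternative
-- what changed: Replaces the deque+distance-array BFS (pop one node at a time, store a distance per cell, check k at pop time) with a level-synchronous BFS over frontier sets: the answer is the level counter at which k is first generated, so no per-node distance storage or pop-time check exists.
-- outside the precondition, e.g. on bfs(-3, -3): A returns 0, B returns 0; on bfs(-1, 5): A returns 5, B returns 5; on bfs(-2, 5): A returns None, B returns -1
import Mathlib
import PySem

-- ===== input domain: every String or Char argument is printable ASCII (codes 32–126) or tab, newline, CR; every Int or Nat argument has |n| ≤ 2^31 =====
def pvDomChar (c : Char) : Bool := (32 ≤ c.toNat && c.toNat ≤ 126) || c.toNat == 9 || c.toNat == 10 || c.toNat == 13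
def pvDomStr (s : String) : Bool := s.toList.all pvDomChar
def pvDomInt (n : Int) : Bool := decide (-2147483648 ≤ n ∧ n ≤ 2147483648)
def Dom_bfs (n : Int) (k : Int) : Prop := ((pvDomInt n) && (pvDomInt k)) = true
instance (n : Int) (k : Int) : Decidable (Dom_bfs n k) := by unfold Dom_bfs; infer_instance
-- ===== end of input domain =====

-- B re-implements the BFS level-synchronously (frontier sets + a step counter) instead of A's
-- deque + per-cell distance array; equality of the RETURN value is proved on 0 ≤ n,k ≤ 100000.

-- ===== PORT A =====
-- body of A's inner 'for next_pos in [current-1, current+1, current*2]' loop: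
-- mark an in-range, unvisited neighbour with visited[current]+1 and append it to the
-- queue (the deque is modelled as front list + reversed back list; append = cons on back)
def pvAStepX (cur : Int) (s : Array Int × List Int) (np : Int) : Array Int × List Int :=
  if 0 ≤ np ∧ np < 100001 ∧ s.1.getD np.toNat (-2) = -1 then
    (s.1.setIfInBounds np.toNat (s.1.getD cur.toNat (-2) + 1), np :: s.2)
  else s

-- A's 'while queue' loop; 'popleft' takes from front, refilling it from the back list
-- when empty; fuel only makes the recursion total (none = fuel out, or the Python loop
-- ending without 'return', i.e. Python returning None)
def pvARunX (k : Int) : Nat → Array Int → List Int → List Int → Option Int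
  | 0, _, _, _ => none
  | fuel+1, vis, front, back =>
    match front with
    | cur :: rest =>
      if cur = k then some (vis.getD cur.toNat (-2))
      else
        let s := [cur - 1, cur + 1, cur * 2].foldl (pvAStepX cur) (vis, back)
        pvARunX k fuel s.1 rest s.2
    | [] =>
      match back.reverse with
      | [] => none
      | cur :: rest =>
        if cur = k then some (vis.getD cur.toNat (-2))
        else
          let s := [cur - 1, cur + 1, cur * 2].foldl (pvAStepX cur) (vis, [])
          pvARunX k fuel s.1 rest s.2

-- visited = [-1]*100001; visited[n] = 0; queue = deque([n]); inside Pre_ the run always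
-- returns 'some', so the .getD default is never used
def bfs (n : Int) (k : Int) : Int :=
  (pvARunX k 600013 ((Array.replicate 100001 (-1)).setIfInBounds n.toNat 0) [n] []).getD 0

-- ===== PORT B =====
-- body of B's inner 'for y in (x-1, x+1, x*2)' loop; state 'none' = B has executed
-- 'return step' (k was generated), so the remaining iterations do nothing; nxt is
-- accumulated by cons (reversed) and restored to insertion order at the level end
def pvBStepX (k : Int) (st : Option (Std.HashSet Int × List Int)) (y : Int) :
    Option (Std.HashSet Int × List Int) :=
  match st with
  | none => none
  | some (V, nxt) =>
    if 0 ≤ y ∧ y < 100001 ∧ ¬ V.contains y then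
      if y = k then none
      else some (V.insert y, y :: nxt)
    else some (V, nxt)

-- one pass of B's 'for x in frontier' loop building nxt (and extending visited)
def pvBLevelX (k : Int) (V : Std.HashSet Int) (frontier : List Int) :
    Option (Std.HashSet Int × List Int) :=
  frontier.foldl (fun st x => [x - 1, x + 1, x * 2].foldl (pvBStepX k) st) (some (V, []))

-- B's 'while frontier' loop; fuel only makes the recursion total
def pvBLoopX (k : Int) : Nat → Std.HashSet Int → List Int → Int → Option Int
  | 0, _, _, _ => none
  | fuel+1, V, frontier, step =>
    if frontier = [] then some (-1)
    else
      match pvBLevelX k V frontier with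
      | none => some (step + 1)
      | some (V', nxt) => pvBLoopX k fuel V' nxt.reverse (step + 1)

def bfs_alt (n : Int) (k : Int) : Int :=
  if n = k then 0
  else (pvBLoopX k 200005 (Std.HashSet.emptyWithCapacity.insert n) [n] 0).getD (-1)

-- ===== PRECONDITION & SPEC =====
-- Pre_ is the problem's natural domain (Baekjoon 1697): 0 ≤ n,k ≤ 100000. Outside it A
-- raises IndexError (for n past the array), or returns None (not an int) when k is
-- unreachable, or — for negative n — returns via accidental negative-index wraparound.
def Pre_bfs (n : Int) (k : Int) : Prop := 0 ≤ n ∧ n ≤ 100000 ∧ 0 ≤ k ∧ k ≤ 100000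
instance (n : Int) (k : Int) : Decidable (Pre_bfs n k) := by unfold Pre_bfs; infer_instance
def pvWitness_bfs : Int × Int := (5, 1)

def Spec_bfs (n : Int) (k : Int) (out : Int) : Prop := out = bfs_alt n k
instance (n : Int) (k : Int) (out : Int) : Decidable (Spec_bfs n k out) := by unfold Spec_bfs; infer_instance

-- ===== CLAIM (what is proved, stated in full; the proofs are below) =====
def Claim_equal_bfs : Prop := ∀ (n : Int) (k : Int), Dom_bfs n k → Pre_bfs n k → Spec_bfs n k (bfs n k)

-- ===== LEMMAS AND PROOFS =====

-- list/assoc models of the two ports (proof side), bridged to the executable ports below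
-- body of A's inner 'for next_pos in [current-1, current+1, current*2]' loop:
-- mark an in-range, unvisited neighbour with visited[current]+1 and append it to the queue
def pvAStep (cur : Int) (s : List Int × List Int) (np : Int) : List Int × List Int :=
  if 0 ≤ np ∧ np < 100001 ∧ PySem.List.pyGetD s.1 np (-2) = -1 then
    (PySem.List.pySetD s.1 np (PySem.List.pyGetD s.1 cur (-2) + 1), s.2 ++ [np])
  else s

-- A's 'while queue' loop; fuel only makes the recursion total (none = fuel out, or the
-- Python loop ending without 'return', i.e. Python returning None)
def pvARun (k : Int) : Nat → List Int → List Int → Option Int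
  | 0, _, _ => none
  | fuel+1, vis, queue =>
    match queue with
    | [] => none
    | cur :: rest =>
      if cur = k then some (PySem.List.pyGetD vis cur (-2))
      else
        let s := [cur - 1, cur + 1, cur * 2].foldl (pvAStep cur) (vis, rest)
        pvARun k fuel s.1 s.2


-- body of B's inner 'for y in (x-1, x+1, x*2)' loop; state 'none' = B has executed
-- 'return step' (k was generated), so the remaining iterations do nothing
def pvBStep (k : Int) (st : Option (PySem.Set Int × List Int)) (y : Int) :
    Option (PySem.Set Int × List Int) :=
  match st with
  | none => none
  | some (V, nxt) =>
    if 0 ≤ y ∧ y < 100001 ∧ ¬ (y ∈ V) then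
      if y = k then none
      else some (PySem.Set.add V y, nxt ++ [y])
    else some (V, nxt)

-- one pass of B's 'for x in frontier' loop building nxt (and extending visited)
def pvBLevel (k : Int) (V : PySem.Set Int) (frontier : List Int) :
    Option (PySem.Set Int × List Int) :=
  frontier.foldl (fun st x => [x - 1, x + 1, x * 2].foldl (pvBStep k) st) (some (V, []))

-- B's 'while frontier' loop; fuel only makes the recursion total
def pvBLoop (k : Int) : Nat → PySem.Set Int → List Int → Int → Option Int
  | 0, _, _, _ => none
  | fuel+1, V, frontier, step =>
    if frontier = [] then some (-1)
    else
      match pvBLevel k V frontier with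
      | none => some (step + 1)
      | some (V', nxt) => pvBLoop k fuel V' nxt (step + 1)


-- 'in range' and reading a visited cell
def pvR (x : Int) : Prop := 0 ≤ x ∧ x < 100001
def pvRd (vis : List Int) (x : Int) : Int := vis.getD x.toNat (-2)

@[simp] theorem pvRd_def (vis : List Int) (x : Int) : pvRd vis x = vis.getD x.toNat (-2) := rfl

-- the level-processing step of A (one 'current'), and B's
def pvLS (s : List Int × List Int) (c : Int) : List Int × List Int :=
  [c - 1, c + 1, c * 2].foldl (pvAStep c) s
def pvBLS (k : Int) (st : Option (PySem.Set Int × List Int)) (x : Int) :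
    Option (PySem.Set Int × List Int) :=
  [x - 1, x + 1, x * 2].foldl (pvBStep k) st

theorem pvBLevel_eq (k : Int) (V : PySem.Set Int) (F : List Int) :
    pvBLevel k V F = F.foldl (pvBLS k) (some (V, [])) := rfl

theorem pvGetD_nonneg (xs : List Int) (i d : Int) (h : 0 ≤ i) :
    PySem.List.pyGetD xs i d = xs.getD i.toNat d := by
  show (PySem.List.pyGet? xs i).getD d = _
  rw [PySem.List.pyGet?_of_nonneg xs h, List.getD_eq_getElem?_getD]

theorem pvRd_set_self (vis : List Int) (y w : Int) (hy : 0 ≤ y)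
    (hlt : y.toNat < vis.length) : pvRd (vis.set y.toNat w) y = w := by
  simp [pvRd, List.getD_eq_getElem?_getD, List.getElem?_set_self hlt]

theorem pvRd_set_ne (vis : List Int) (x y w : Int) (hx : 0 ≤ x) (hy : 0 ≤ y)
    (hne : x ≠ y) : pvRd (vis.set y.toNat w) x = pvRd vis x := by
  have h : y.toNat ≠ x.toNat := by omega
  simp [pvRd, List.getD_eq_getElem?_getD, List.getElem?_set_ne h]

theorem pvCountSet : ∀ (l : List Int) (j : Nat) (w : Int), l[j]? = some (-1) → w ≠ -1 →
    (l.set j w).count (-1) + 1 = l.count (-1) := by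
  intro l
  induction l with
  | nil => intro j w h _; simp at h
  | cons b t ih =>
    intro j w h hw
    cases j with
    | zero =>
      simp at h
      subst h
      simp [List.count_cons, hw]
    | succ m =>
      simp at h
      rw [List.set_cons_succ]
      simp only [List.count_cons]
      have := ih m w (by simpa using h) hw
      by_cases hb : b = -1 <;> simp [hb] <;> omega

-- step characterisations (definitional)
theorem pvAStep_mk (cur y : Int) (vis acc : List Int) :
    pvAStep cur (vis, acc) y =
      if 0 ≤ y ∧ y < 100001 ∧ PySem.List.pyGetD vis y (-2) = -1 then
        (PySem.List.pySetD vis y (PySem.List.pyGetD vis cur (-2) + 1), acc ++ [y])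
      else (vis, acc) := rfl

theorem pvBStep_mk (k y : Int) (V : PySem.Set Int) (nxt : List Int) :
    pvBStep k (some (V, nxt)) y =
      if 0 ≤ y ∧ y < 100001 ∧ ¬ (y ∈ V) then
        (if y = k then none else some (PySem.Set.add V y, nxt ++ [y]))
      else some (V, nxt) := rfl

theorem pvBStep_none (k y : Int) : pvBStep k none y = none := rfl

theorem pvBFold_none (k : Int) (l : List Int) : l.foldl (pvBStep k) none = none := by
  induction l with
  | nil => rfl
  | cons y t ih => rw [List.foldl_cons, pvBStep_none]; exact ih

theorem pvBLSFold_none (k : Int) (F : List Int) : F.foldl (pvBLS k) none = none := by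
  induction F with
  | nil => rfl
  | cons c t ih => rw [List.foldl_cons]; rw [show pvBLS k none c = none from pvBFold_none k _]; exact ih

-- preservation of already-marked cells by A's neighbour processing
theorem pvAStep_keep (cur np x : Int) (s : List Int × List Int) (hx : 0 ≤ x)
    (h : pvRd s.1 x ≠ -1) :
    pvRd (pvAStep cur s np).1 x = pvRd s.1 x ∧ (pvAStep cur s np).1.length = s.1.length := by
  unfold pvAStep
  by_cases hg : 0 ≤ np ∧ np < 100001 ∧ PySem.List.pyGetD s.1 np (-2) = -1
  · rw [if_pos hg]
    obtain ⟨h1, h2, h3⟩ := hg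
    rw [pvGetD_nonneg _ _ _ h1, ← pvRd_def] at h3
    rw [PySem.List.pySetD_of_nonneg _ _ h1]
    have hne : x ≠ np := by intro e; rw [e] at h; exact h h3
    exact ⟨pvRd_set_ne s.1 x np _ hx h1 hne, List.length_set⟩
  · rw [if_neg hg]; exact ⟨rfl, rfl⟩

theorem pvAFold_keep (cur : Int) (l : List Int) : ∀ (s : List Int × List Int) (x : Int),
    0 ≤ x → pvRd s.1 x ≠ -1 →
    pvRd (l.foldl (pvAStep cur) s).1 x = pvRd s.1 x ∧
      (l.foldl (pvAStep cur) s).1.length = s.1.length := by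
  induction l with
  | nil => intro s x _ _; exact ⟨rfl, rfl⟩
  | cons np t ih =>
    intro s x hx h
    rw [List.foldl_cons]
    obtain ⟨hk, hl⟩ := pvAStep_keep cur np x s hx h
    obtain ⟨hk2, hl2⟩ := ih (pvAStep cur s np) x hx (by rw [hk]; exact h)
    exact ⟨by rw [hk2, hk], by rw [hl2, hl]⟩

-- queue component of A's folds factors out
theorem pvFoldFactor (f : List Int × List Int → Int → List Int × List Int)
    (hf : ∀ (v q : List Int) (y : Int), f (v, q) y = ((f (v, []) y).1, q ++ (f (v, []) y).2)) :
    ∀ (l : List Int) (v q : List Int),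
      l.foldl f (v, q) = ((l.foldl f (v, [])).1, q ++ (l.foldl f (v, [])).2) := by
  intro l
  induction l with
  | nil => intro v q; simp
  | cons y t ih =>
    intro v q
    rw [List.foldl_cons, List.foldl_cons, hf v q y, hf v [] y, List.nil_append]
    rw [ih (f (v, []) y).1 (q ++ (f (v, []) y).2), ih (f (v, []) y).1 (f (v, []) y).2]
    simp [List.append_assoc]

theorem pvAStep_factor (cur : Int) : ∀ (v q : List Int) (y : Int),
    pvAStep cur (v, q) y = ((pvAStep cur (v, []) y).1, q ++ (pvAStep cur (v, []) y).2) := by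
  intro v q y
  rw [pvAStep_mk, pvAStep_mk]
  by_cases hg : 0 ≤ y ∧ y < 100001 ∧ PySem.List.pyGetD v y (-2) = -1
  · rw [if_pos hg, if_pos hg]; simp
  · rw [if_neg hg, if_neg hg]; simp

theorem pvLS_factor (c : Int) (v q : List Int) :
    pvLS (v, q) c = ((pvLS (v, []) c).1, q ++ (pvLS (v, []) c).2) :=
  pvFoldFactor (pvAStep c) (pvAStep_factor c) _ v q

theorem pvLSFold_factor (F : List Int) (v q : List Int) :
    F.foldl pvLS (v, q) = ((F.foldl pvLS (v, [])).1, q ++ (F.foldl pvLS (v, [])).2) :=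
  pvFoldFactor pvLS (fun v q c => pvLS_factor c v q) F v q

-- one unfolding of A's loop (definitional)
theorem pvARun_succ (k : Int) (fuel : Nat) (vis : List Int) (cur : Int) (rest : List Int) :
    pvARun k (fuel + 1) vis (cur :: rest) =
      if cur = k then some (PySem.List.pyGetD vis cur (-2))
      else pvARun k fuel (pvLS (vis, rest) cur).1 (pvLS (vis, rest) cur).2 := rfl

-- A pops a whole level in |F| steps
theorem pvARun_level (k : Int) : ∀ (F : List Int), (∀ c ∈ F, c ≠ k) →
    ∀ (nxt vis : List Int) (fuel : Nat),
    pvARun k (F.length + fuel) vis (F ++ nxt) =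
      pvARun k fuel (F.foldl pvLS (vis, [])).1 (nxt ++ (F.foldl pvLS (vis, [])).2) := by
  intro F
  induction F with
  | nil => intro _ nxt vis fuel; simp
  | cons c F' ih =>
    intro hF nxt vis fuel
    have hc : c ≠ k := hF c (List.mem_cons_self)
    rw [show (c :: F').length + fuel = (F'.length + fuel) + 1 by simp [List.length_cons]; omega]
    rw [List.cons_append, pvARun_succ, if_neg hc]
    rw [pvLS_factor c vis (F' ++ nxt)]
    show pvARun k (F'.length + fuel) (pvLS (vis, []) c).1
        ((F' ++ nxt) ++ (pvLS (vis, []) c).2) = _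
    rw [List.append_assoc]
    rw [ih (fun c hc => hF c (List.mem_cons_of_mem _ hc)) (nxt ++ (pvLS (vis, []) c).2)
      (pvLS (vis, []) c).1 fuel]
    rw [List.foldl_cons]
    rw [show pvLS (vis, []) c = ((pvLS (vis, []) c).1, (pvLS (vis, []) c).2) from rfl]
    rw [pvLSFold_factor F' (pvLS (vis, []) c).1 (pvLS (vis, []) c).2]
    simp [List.append_assoc]

-- once k is marked and in the queue, A returns k's mark
theorem pvARun_popUntil (k v : Int) (hv : v ≠ -1) : ∀ (pre : List Int),
    ∀ (post vis : List Int) (fuel : Nat), 0 ≤ k → pvRd vis k = v → pre.length + 1 ≤ fuel →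
    pvARun k fuel vis (pre ++ k :: post) = some v := by
  intro pre
  induction pre with
  | nil =>
    intro post vis fuel hk hval hf
    obtain ⟨f, rfl⟩ : ∃ f, fuel = f + 1 := ⟨fuel - 1, by omega⟩
    rw [List.nil_append, pvARun_succ, if_pos rfl, pvGetD_nonneg _ _ _ hk, ← pvRd_def, hval]
  | cons c pre' ih =>
    intro post vis fuel hk hval hf
    obtain ⟨f, rfl⟩ : ∃ f, fuel = f + 1 := ⟨fuel - 1, by omega⟩
    rw [List.cons_append, pvARun_succ]
    by_cases hck : c = k
    · subst hck
      rw [if_pos rfl, pvGetD_nonneg _ _ _ hk, ← pvRd_def, hval]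
    · rw [if_neg hck, pvLS_factor]
      obtain ⟨hkeep, _⟩ := pvAFold_keep c [c - 1, c + 1, c * 2] (vis, []) k hk
        (by show pvRd vis k ≠ -1; rw [hval]; exact hv)
      show pvARun k f (pvLS (vis, []) c).1 ((pre' ++ k :: post) ++ (pvLS (vis, []) c).2) = _
      rw [List.append_assoc, List.cons_append]
      exact ih (post ++ (pvLS (vis, []) c).2) (pvLS (vis, []) c).1 f hk
        (by rw [show (pvLS (vis, []) c).1 = ([c-1,c+1,c*2].foldl (pvAStep c) (vis, [])).1 from rfl, hkeep]; exact hval)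
        (by simp at hf ⊢; omega)

-- what A's level processing does to the visited array
def pvAPost (vis : List Int) (i : Int) (res : List Int × List Int)
    (acc gen new : List Int) : Prop :=
  res.2 = acc ++ new ∧
  res.1.length = vis.length ∧
  (∀ y ∈ new, pvR y ∧ pvRd res.1 y = i + 1 ∧ pvRd vis y = -1) ∧
  (∀ x : Int, pvR x → pvRd vis x ≠ -1 → pvRd res.1 x = pvRd vis x) ∧
  (∀ x : Int, pvR x → (pvRd res.1 x ≠ -1 ↔ pvRd vis x ≠ -1 ∨ x ∈ new)) ∧
  res.1.count (-1) + new.length = vis.count (-1) ∧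
  (∀ y ∈ gen, pvR y → pvRd res.1 y ≠ -1) ∧
  (∀ y ∈ new, y ∈ gen)

theorem pvAPost_comp (vis : List Int) (i : Int) (hi : 0 ≤ i) (r1 r2 : List Int × List Int)
    (acc g1 g2 n1 n2 : List Int)
    (h1 : pvAPost vis i r1 acc g1 n1) (h2 : pvAPost r1.1 i r2 r1.2 g2 n2) :
    pvAPost vis i r2 acc (g1 ++ g2) (n1 ++ n2) := by
  obtain ⟨a1, a2, a3, a4, a5, a6, a7, a8⟩ := h1
  obtain ⟨b1, b2, b3, b4, b5, b6, b7, b8⟩ := h2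
  refine ⟨?_, ?_, ?_, ?_, ?_, ?_, ?_, ?_⟩
  · rw [b1, a1, List.append_assoc]
  · rw [b2, a2]
  · intro y hy
    rcases List.mem_append.1 hy with hy1 | hy2
    · obtain ⟨hR, hval, hold⟩ := a3 y hy1
      exact ⟨hR, by rw [b4 y hR (by rw [hval]; omega), hval], hold⟩
    · obtain ⟨hR, hval, hmid⟩ := b3 y hy2
      refine ⟨hR, hval, ?_⟩
      by_contra hvis
      exact hvis (by rw [← a4 y hR hvis]; exact hmid)
  · intro x hx h
    rw [b4 x hx (by rw [a4 x hx h]; exact h), a4 x hx h]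
  · intro x hx
    rw [b5 x hx, a5 x hx, List.mem_append]
    tauto
  · have := a6; have := b6; simp at *; omega
  · intro y hy hR
    rcases List.mem_append.1 hy with hy1 | hy2
    · exact by rw [b4 y hR (a7 y hy1 hR)]; exact a7 y hy1 hR
    · exact b7 y hy2 hR
  · intro y hy
    rw [List.mem_append]
    rcases List.mem_append.1 hy with hy1 | hy2
    · exact Or.inl (a8 y hy1)
    · exact Or.inr (b8 y hy2)

theorem pvAInner (cur i : Int) (hi : 0 ≤ i) (hcR : pvR cur) :
    ∀ (ys : List Int) (vis acc : List Int), vis.length = 100001 → pvRd vis cur = i →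
    ∃ new, pvAPost vis i (ys.foldl (pvAStep cur) (vis, acc)) acc ys new := by
  intro ys
  induction ys with
  | nil =>
    intro vis acc _ _
    exact ⟨[], by simp [pvAPost]⟩
  | cons y ys' ih =>
    intro vis acc hl hcur
    rw [List.foldl_cons, pvAStep_mk]
    by_cases hg : 0 ≤ y ∧ y < 100001 ∧ PySem.List.pyGetD vis y (-2) = -1
    · rw [if_pos hg, PySem.List.pySetD_of_nonneg _ _ hg.1,
        pvGetD_nonneg _ _ _ hcR.1, ← pvRd_def, hcur]
      have hyR : pvR y := ⟨hg.1, hg.2.1⟩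
      have hvisy : pvRd vis y = -1 := by
        have := hg.2.2; rwa [pvGetD_nonneg _ _ _ hg.1, ← pvRd_def] at this
      have hytoNat : y.toNat < vis.length := by rw [hl]; omega
      have hl1 : (vis.set y.toNat (i + 1)).length = 100001 := by
        rw [List.length_set]; exact hl
      have hRdy : pvRd (vis.set y.toNat (i + 1)) y = i + 1 :=
        pvRd_set_self vis y (i + 1) hg.1 hytoNat
      have hRd_ne : ∀ x : Int, 0 ≤ x → x ≠ y →
          pvRd (vis.set y.toNat (i + 1)) x = pvRd vis x :=
        fun x hx hne => pvRd_set_ne vis x y (i + 1) hx hg.1 hne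
      have hcury : cur ≠ y := by
        intro e; rw [e] at hcur; rw [hcur] at hvisy; omega
      have hcur1 : pvRd (vis.set y.toNat (i + 1)) cur = i := by
        rw [hRd_ne cur hcR.1 hcury]; exact hcur
      obtain ⟨new', p1, p2, p3, p4, p5, p6, p7, p8⟩ := ih (vis.set y.toNat (i + 1)) (acc ++ [y]) hl1 hcur1
      refine ⟨y :: new', ?_, ?_, ?_, ?_, ?_, ?_, ?_, ?_⟩
      · rw [p1, List.append_assoc]; rfl
      · rw [p2, List.length_set]
      · intro z hz
        rcases List.mem_cons.1 hz with rfl | hz'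
        · exact ⟨hyR, by rw [p4 z hyR (by rw [hRdy]; omega), hRdy], hvisy⟩
        · obtain ⟨hR, hval, hmid⟩ := p3 z hz'
          refine ⟨hR, hval, ?_⟩
          have hzy : z ≠ y := by
            intro e; rw [e, hRdy] at hmid; omega
          rw [← hRd_ne z hR.1 hzy]; exact hmid
      · intro x hx h
        have hxy : x ≠ y := by intro e; rw [e, hvisy] at h; exact h rfl
        rw [p4 x hx (by rw [hRd_ne x hx.1 hxy]; exact h), hRd_ne x hx.1 hxy]
      · intro x hx
        by_cases hxy : x = y
        · subst hxy
          have : pvRd ((ys'.foldl (pvAStep cur) (vis.set x.toNat (i + 1), acc ++ [x])).1) x = i + 1 := by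
            rw [p4 x hx (by rw [hRdy]; omega)]; exact hRdy
          simp only [this, hvisy, List.mem_cons]
          constructor
          · intro _; tauto
          · intro _; omega
        · rw [p5 x hx, hRd_ne x hx.1 hxy]
          simp only [List.mem_cons]
          tauto
      · have hsome : vis[y.toNat]? = some (-1) := by
          have := hvisy
          rw [pvRd_def, List.getD_eq_getElem?_getD, List.getElem?_eq_getElem hytoNat] at this
          rw [List.getElem?_eq_getElem hytoNat]
          simp at this ⊢; omega
        have hcnt := pvCountSet vis y.toNat (i + 1) hsome (by omega)
        simp only [List.length_cons]
        omega
      · intro z hz hzR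
        rcases List.mem_cons.1 hz with rfl | hz'
        · rw [p4 z hzR (by rw [hRdy]; omega), hRdy]; omega
        · exact p7 z hz' hzR
      · intro z hz
        rcases List.mem_cons.1 hz with rfl | hz'
        · exact List.mem_cons_self
        · exact List.mem_cons_of_mem _ (p8 z hz')
    · rw [if_neg hg]
      obtain ⟨new', p1, p2, p3, p4, p5, p6, p7, p8⟩ := ih vis acc hl hcur
      refine ⟨new', p1, p2, p3, p4, p5, p6, ?_, ?_⟩
      · intro z hz hzR
        rcases List.mem_cons.1 hz with rfl | hz'
        · have hnm : pvRd vis z ≠ -1 := by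
            intro e
            exact hg ⟨hzR.1, hzR.2, by rw [pvGetD_nonneg _ _ _ hzR.1, ← pvRd_def]; exact e⟩
          rw [p4 z hzR hnm]; exact hnm
        · exact p7 z hz' hzR
      · intro z hz
        exact List.mem_cons_of_mem _ (p8 z hz)

theorem pvALevel (i : Int) (hi : 0 ≤ i) :
    ∀ (F : List Int) (vis acc : List Int), vis.length = 100001 →
    (∀ c ∈ F, pvR c ∧ pvRd vis c = i) →
    ∃ new, pvAPost vis i (F.foldl pvLS (vis, acc)) acc
      (F.flatMap (fun c => [c - 1, c + 1, c * 2])) new := by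
  intro F
  induction F with
  | nil =>
    intro vis acc _ _
    exact ⟨[], by simp [pvAPost]⟩
  | cons c F' ih =>
    intro vis acc hl hF
    obtain ⟨hcR, hcv⟩ := hF c List.mem_cons_self
    obtain ⟨n1, h1⟩ := pvAInner c i hi hcR [c - 1, c + 1, c * 2] vis acc hl hcv
    have e1 : pvLS (vis, acc) c = [c - 1, c + 1, c * 2].foldl (pvAStep c) (vis, acc) := rfl
    rw [List.foldl_cons]
    rw [show pvLS (vis, acc) c = ((pvLS (vis, acc) c).1, (pvLS (vis, acc) c).2) from rfl]
    have hl1 : (pvLS (vis, acc) c).1.length = 100001 := by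
      rw [e1] at *; rw [h1.2.1, hl]
    have hF1 : ∀ c' ∈ F', pvR c' ∧ pvRd (pvLS (vis, acc) c).1 c' = i := by
      intro c' hc'
      obtain ⟨hR', hv'⟩ := hF c' (List.mem_cons_of_mem _ hc')
      exact ⟨hR', by rw [e1, h1.2.2.2.1 c' hR' (by rw [hv']; omega), hv']⟩
    obtain ⟨n2, h2⟩ := ih (pvLS (vis, acc) c).1 (pvLS (vis, acc) c).2 hl1 hF1
    refine ⟨n1 ++ n2, ?_⟩
    have hcomp := pvAPost_comp vis i hi (pvLS (vis, acc) c)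
      (F'.foldl pvLS ((pvLS (vis, acc) c).1, (pvLS (vis, acc) c).2)) acc
      [c - 1, c + 1, c * 2] (F'.flatMap (fun c => [c - 1, c + 1, c * 2])) n1 n2
      (by rw [e1]; exact h1) h2
    rwa [List.flatMap_cons]

-- B's level fold matched against A's
theorem pvBInner (k i : Int) (hi : 0 ≤ i) (hkR : pvR k) (cur : Int) (hcR : pvR cur) :
    ∀ (ys : List Int) (vis acc : List Int) (V : PySem.Set Int),
    vis.length = 100001 → (∀ x : Int, pvR x → (pvRd vis x ≠ -1 ↔ x ∈ V)) →
    (∀ x ∈ V, pvR x) → pvRd vis cur = i → k ∉ V →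
    ((k ∈ ys ∧ ys.foldl (pvBStep k) (some (V, acc)) = none) ∨
      (k ∉ ys ∧ ∃ V' : PySem.Set Int,
        ys.foldl (pvBStep k) (some (V, acc)) =
          some (V', (ys.foldl (pvAStep cur) (vis, acc)).2) ∧
        (∀ x : Int, pvR x → (pvRd (ys.foldl (pvAStep cur) (vis, acc)).1 x ≠ -1 ↔ x ∈ V')) ∧
        (∀ x ∈ V', pvR x) ∧
        (∀ z : Int, z ∈ V' ↔ z ∈ V ∨
          (pvR z ∧ pvRd vis z = -1 ∧ pvRd (ys.foldl (pvAStep cur) (vis, acc)).1 z ≠ -1)))) := by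
  intro ys
  induction ys with
  | nil =>
    intro vis acc V hl hiff hVR hcur hkV
    refine Or.inr ⟨by simp, V, rfl, hiff, hVR, ?_⟩
    intro z
    constructor
    · intro h; exact Or.inl h
    · rintro (h | ⟨_, h1, h2⟩)
      · exact h
      · exact absurd h1 (by simpa using h2)
  | cons y ys' ih =>
    intro vis acc V hl hiff hVR hcur hkV
    rw [List.foldl_cons, pvBStep_mk]
    by_cases hyk : y = k
    · subst hyk
      rw [if_pos ⟨hkR.1, hkR.2, hkV⟩, if_pos rfl, pvBFold_none]
      exact Or.inl ⟨List.mem_cons_self, rfl⟩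
    · by_cases hgB : 0 ≤ y ∧ y < 100001 ∧ ¬ (y ∈ V)
      · rw [if_pos hgB, if_neg hyk]
        have hyR : pvR y := ⟨hgB.1, hgB.2.1⟩
        have hvisy : pvRd vis y = -1 := by
          by_contra h
          exact hgB.2.2 ((hiff y hyR).1 h)
        -- A's step fires too
        have hgA : 0 ≤ y ∧ y < 100001 ∧ PySem.List.pyGetD vis y (-2) = -1 :=
          ⟨hgB.1, hgB.2.1, by rw [pvGetD_nonneg _ _ _ hgB.1, ← pvRd_def]; exact hvisy⟩
        rw [List.foldl_cons, pvAStep_mk, if_pos hgA, PySem.List.pySetD_of_nonneg _ _ hgB.1,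
          pvGetD_nonneg _ _ _ hcR.1, ← pvRd_def, hcur]
        have hytoNat : y.toNat < vis.length := by rw [hl]; omega
        have hl1 : (vis.set y.toNat (i + 1)).length = 100001 := by
          rw [List.length_set]; exact hl
        have hRdy : pvRd (vis.set y.toNat (i + 1)) y = i + 1 :=
          pvRd_set_self vis y (i + 1) hgB.1 hytoNat
        have hRd_ne : ∀ x : Int, 0 ≤ x → x ≠ y →
            pvRd (vis.set y.toNat (i + 1)) x = pvRd vis x :=
          fun x hx hne => pvRd_set_ne vis x y (i + 1) hx hgB.1 hne
        have hiff1 : ∀ x : Int, pvR x →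
            (pvRd (vis.set y.toNat (i + 1)) x ≠ -1 ↔ x ∈ PySem.Set.add V y) := by
          intro x hx
          rw [PySem.Set.mem_add]
          by_cases hxy : x = y
          · subst hxy
            rw [hRdy]
            constructor
            · intro _; exact Or.inr rfl
            · intro _; omega
          · rw [hRd_ne x hx.1 hxy, hiff x hx]
            tauto
        have hVR1 : ∀ x ∈ PySem.Set.add V y, pvR x := by
          intro x hx
          rcases (PySem.Set.mem_add V y x).1 hx with h | rfl
          · exact hVR x h
          · exact hyR
        have hcur1 : pvRd (vis.set y.toNat (i + 1)) cur = i := by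
          have hcury : cur ≠ y := by
            intro e; rw [e] at hcur; rw [hcur] at hvisy; omega
          rw [hRd_ne cur hcR.1 hcury]; exact hcur
        have hkV1 : k ∉ PySem.Set.add V y := by
          intro h
          rcases (PySem.Set.mem_add V y k).1 h with h | h
          · exact hkV h
          · exact hyk h.symm
        rcases ih (vis.set y.toNat (i + 1)) (acc ++ [y]) (PySem.Set.add V y) hl1 hiff1 hVR1 hcur1 hkV1 with
          ⟨hmem, hnone⟩ | ⟨hknot, V', e', hiff', hVR', hmem'⟩
        · exact Or.inl ⟨List.mem_cons_of_mem _ hmem, hnone⟩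
        · refine Or.inr ⟨?_, V', e', hiff', hVR', ?_⟩
          · intro h
            rcases List.mem_cons.1 h with h | h
            · exact hyk h.symm
            · exact hknot h
          · intro z
            rw [hmem' z, PySem.Set.mem_add]
            by_cases hzy : z = y
            · subst hzy
              have hz1 : pvRd ((ys'.foldl (pvAStep cur) (vis.set z.toNat (i + 1), acc ++ [z])).1) z ≠ -1 :=
                (hiff' z hyR).2 ((hmem' z).2 (Or.inl ((PySem.Set.mem_add V z z).2 (Or.inr rfl))))
              constructor
              · intro _; exact Or.inr ⟨hyR, hvisy, hz1⟩
              · intro _; exact Or.inl (Or.inr rfl)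
            · have hsame : pvRd (vis.set y.toNat (i + 1)) z = pvRd vis z ∨ ¬ pvR z := by
                by_cases hz : pvR z
                · exact Or.inl (hRd_ne z hz.1 hzy)
                · exact Or.inr hz
              rcases hsame with hsame | hnR
              · rw [hsame]
                constructor
                · rintro ((h | h) | h)
                  · exact Or.inl h
                  · exact absurd h hzy
                  · exact Or.inr h
                · rintro (h | h)
                  · exact Or.inl (Or.inl h)
                  · exact Or.inr h
              · constructor
                · rintro ((h | h) | ⟨h1, _⟩)
                  · exact Or.inl h
                  · exact absurd h hzy
                  · exact absurd h1 hnR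
                · rintro (h | ⟨h1, _⟩)
                  · exact Or.inl (Or.inl h)
                  · exact absurd h1 hnR
      · rw [if_neg hgB]
        have hgA : ¬ (0 ≤ y ∧ y < 100001 ∧ PySem.List.pyGetD vis y (-2) = -1) := by
          intro ⟨h1, h2, h3⟩
          rw [pvGetD_nonneg _ _ _ h1, ← pvRd_def] at h3
          exact hgB ⟨h1, h2, fun hmem => by
            have := (hiff y ⟨h1, h2⟩).2 hmem
            exact this h3⟩
        rw [List.foldl_cons, pvAStep_mk, if_neg hgA]
        rcases ih vis acc V hl hiff hVR hcur hkV with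
          ⟨hmem, hnone⟩ | ⟨hknot, V', e', hiff', hVR', hmem'⟩
        · exact Or.inl ⟨List.mem_cons_of_mem _ hmem, hnone⟩
        · refine Or.inr ⟨?_, V', e', hiff', hVR', hmem'⟩
          intro h
          rcases List.mem_cons.1 h with h | h
          · exact hyk h.symm
          · exact hknot h

theorem pvBLevelLemma (k i : Int) (hi : 0 ≤ i) (hkR : pvR k) :
    ∀ (F : List Int) (vis acc : List Int) (V : PySem.Set Int),
    vis.length = 100001 → (∀ x : Int, pvR x → (pvRd vis x ≠ -1 ↔ x ∈ V)) →
    (∀ x ∈ V, pvR x) → (∀ c ∈ F, pvR c ∧ pvRd vis c = i) → k ∉ V →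
    (((∃ c ∈ F, k ∈ [c - 1, c + 1, c * 2]) ∧
        F.foldl (pvBLS k) (some (V, acc)) = none) ∨
      ((∀ c ∈ F, k ∉ [c - 1, c + 1, c * 2]) ∧ ∃ V' : PySem.Set Int,
        F.foldl (pvBLS k) (some (V, acc)) = some (V', (F.foldl pvLS (vis, acc)).2) ∧
        (∀ x : Int, pvR x → (pvRd (F.foldl pvLS (vis, acc)).1 x ≠ -1 ↔ x ∈ V')) ∧
        (∀ x ∈ V', pvR x) ∧
        (∀ z : Int, z ∈ V' ↔ z ∈ V ∨
          (pvR z ∧ pvRd vis z = -1 ∧ pvRd (F.foldl pvLS (vis, acc)).1 z ≠ -1)))) := by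
  intro F
  induction F with
  | nil =>
    intro vis acc V hl hiff hVR hF hkV
    refine Or.inr ⟨by simp, V, rfl, hiff, hVR, ?_⟩
    intro z
    constructor
    · intro h; exact Or.inl h
    · rintro (h | ⟨_, h1, h2⟩)
      · exact h
      · exact absurd h1 (by simpa using h2)
  | cons c F' ih =>
    intro vis acc V hl hiff hVR hF hkV
    obtain ⟨hcR, hcv⟩ := hF c List.mem_cons_self
    rw [List.foldl_cons, List.foldl_cons]
    have hBLS : pvBLS k (some (V, acc)) c = [c - 1, c + 1, c * 2].foldl (pvBStep k) (some (V, acc)) := rfl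
    have hLS : pvLS (vis, acc) c = [c - 1, c + 1, c * 2].foldl (pvAStep c) (vis, acc) := rfl
    rcases pvBInner k i hi hkR c hcR [c - 1, c + 1, c * 2] vis acc V hl hiff hVR hcv hkV with
      ⟨hkmem, hnone⟩ | ⟨hknot, V1, e1, hiff1, hVR1, hmem1⟩
    · rw [hBLS, hnone, pvBLSFold_none]
      exact Or.inl ⟨⟨c, List.mem_cons_self, hkmem⟩, rfl⟩
    · -- A-side facts for this element
      obtain ⟨n1, p1⟩ := pvAInner c i hi hcR [c - 1, c + 1, c * 2] vis acc hl hcv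
      have hl1 : (pvLS (vis, acc) c).1.length = 100001 := by
        rw [hLS, p1.2.1, hl]
      have hF1 : ∀ c' ∈ F', pvR c' ∧ pvRd (pvLS (vis, acc) c).1 c' = i := by
        intro c' hc'
        obtain ⟨hR', hv'⟩ := hF c' (List.mem_cons_of_mem _ hc')
        exact ⟨hR', by rw [hLS, p1.2.2.2.1 c' hR' (by rw [hv']; omega), hv']⟩
      -- A-side facts for the remaining elements
      obtain ⟨n2, p2⟩ := pvALevel i hi F' (pvLS (vis, acc) c).1 (pvLS (vis, acc) c).2 hl1 hF1
      rw [hBLS, e1]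
      rw [show pvLS (vis, acc) c = ((pvLS (vis, acc) c).1, (pvLS (vis, acc) c).2) from rfl]
      rcases ih (pvLS (vis, acc) c).1 (pvLS (vis, acc) c).2 V1 hl1
          hiff1 hVR1 hF1
          (by
            intro hkmem
            rcases (hmem1 k).1 hkmem with h | ⟨_, hk1, hk2⟩
            · exact hkV h
            · rcases (p1.2.2.2.2.1 k hkR).1 hk2 with h | h
              · exact h hk1
              · exact hknot (p1.2.2.2.2.2.2.2 k h)) with
        ⟨hkmem2, hnone2⟩ | ⟨hknot2, V', e2, hiff2, hVR2, hmem2⟩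
      · obtain ⟨c2, hc2, hkc2⟩ := hkmem2
        exact Or.inl ⟨⟨c2, List.mem_cons_of_mem _ hc2, hkc2⟩, hnone2⟩
      · refine Or.inr ⟨?_, V', e2, hiff2, hVR2, ?_⟩
        · intro c2 hc2
          rcases List.mem_cons.1 hc2 with rfl | hc2'
          · exact hknot
          · exact hknot2 c2 hc2'
        · intro z
          rw [hmem2 z, hmem1 z]
          constructor
          · rintro ((h | ⟨hzR, hz1, hz2⟩) | ⟨hzR, hz1, hz2⟩)
            · exact Or.inl h
            · refine Or.inr ⟨hzR, hz1, ?_⟩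
              rw [p2.2.2.2.1 z hzR hz2]
              exact hz2
            · refine Or.inr ⟨hzR, ?_, hz2⟩
              by_contra hvis
              exact hvis (by rw [← p1.2.2.2.1 z hzR hvis]; exact hz1)
          · rintro (h | ⟨hzR, hz1, hz2⟩)
            · exact Or.inl (Or.inl h)
            · by_cases hmid : pvRd ([c - 1, c + 1, c * 2].foldl (pvAStep c) (vis, acc)).1 z = -1
              · exact Or.inr ⟨hzR, hmid, hz2⟩
              · exact Or.inl (Or.inr ⟨hzR, hz1, hmid⟩)

-- a set of in-range cells closed under the in-range moves contains the whole range
theorem pvClosed (M : List Int) (c : Int) (hc : c ∈ M) (hcR : pvR c)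
    (hcl : ∀ x ∈ M, ∀ y ∈ [x - 1, x + 1, x * 2], pvR y → y ∈ M) :
    ∀ z, pvR z → z ∈ M := by
  have up : ∀ j : Nat, c + j ≤ 100000 → c + j ∈ M := by
    intro j
    induction j with
    | zero => intro _; simpa using hc
    | succ m ihm =>
      intro h
      have hb : c + (m : Int) ≤ 100000 := by push_cast at h ⊢; omega
      have hm : c + (m : Int) ∈ M := ihm hb
      have hmemnbr : c + (m : Int) + 1 ∈ [c + (m : Int) - 1, c + (m : Int) + 1, (c + (m : Int)) * 2] := by simp
      have := hcl (c + (m : Int)) hm (c + (m : Int) + 1) hmemnbr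
        ⟨by have := hcR.1; omega, by push_cast at h; omega⟩
      have e : c + ((m + 1 : Nat) : Int) = c + (m : Int) + 1 := by push_cast; ring
      rwa [e]
  have down : ∀ j : Nat, 0 ≤ c - j → c - j ∈ M := by
    intro j
    induction j with
    | zero => intro _; simpa using hc
    | succ m ihm =>
      intro h
      have hb : 0 ≤ c - (m : Int) := by push_cast at h ⊢; omega
      have hm : c - (m : Int) ∈ M := ihm hb
      have hmemnbr : c - (m : Int) - 1 ∈ [c - (m : Int) - 1, c - (m : Int) + 1, (c - (m : Int)) * 2] := by simp
      have := hcl (c - (m : Int)) hm (c - (m : Int) - 1) hmemnbr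
        ⟨by push_cast at h; omega, by have := hcR.2; omega⟩
      have e : c - ((m + 1 : Nat) : Int) = c - (m : Int) - 1 := by push_cast; ring
      rwa [e]
  intro z hz
  obtain ⟨hz1, hz2⟩ := hz
  obtain ⟨hc1, hc2⟩ := hcR
  by_cases h : c ≤ z
  · have := up (z - c).toNat (by omega)
    have e : c + (((z - c).toNat : Nat) : Int) = z := by omega
    rwa [e] at this
  · have := down (c - z).toNat (by omega)
    have e : c - (((c - z).toNat : Nat) : Int) = z := by omega
    rwa [e] at this

-- main simulation: at the start of each level the two loops agree
theorem pvOuter (k : Int) (hkR : pvR k) :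
    ∀ (N : Nat) (F vis : List Int) (V : PySem.Set Int) (i : Int) (fuelA fuelB : Nat),
      vis.length = 100001 → (∀ x : Int, pvR x → (pvRd vis x ≠ -1 ↔ x ∈ V)) →
      (∀ x ∈ V, pvR x) → F ≠ [] → (∀ c ∈ F, pvR c ∧ pvRd vis c = i) → k ∉ V → 0 ≤ i →
      (∀ x ∈ V, x ∉ F → ∀ y ∈ [x - 1, x + 1, x * 2], pvR y → y ∈ V) →
      vis.count (-1) ≤ N → 5 * N + F.length + 1 ≤ fuelA → N + 1 ≤ fuelB →
      ∃ r, pvARun k fuelA vis F = some r ∧ pvBLoop k fuelB V F i = some r := by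
  intro N
  induction N using Nat.strong_induction_on with
  | _ N ihN =>
    intro F vis V i fuelA fuelB hl hiff hVR hFne hF hkV hi hclosed hcnt hfa hfb
    -- F members are in V and hence not k
    have hFV : ∀ c ∈ F, c ∈ V := by
      intro c hc
      exact (hiff c (hF c hc).1).1 (by rw [(hF c hc).2]; omega)
    have hFk : ∀ c ∈ F, c ≠ k := by
      intro c hc e
      exact hkV (e ▸ hFV c hc)
    -- unfold B one level
    obtain ⟨fb, rfl⟩ : ∃ fb, fuelB = fb + 1 := ⟨fuelB - 1, by omega⟩
    have hBunfold : pvBLoop k (fb + 1) V F i =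
        match pvBLevel k V F with
        | none => some (i + 1)
        | some (V', nxt) => pvBLoop k fb V' nxt (i + 1) := by
      show (if F = [] then some (-1) else _) = _
      rw [if_neg hFne]
    -- A processes the level
    obtain ⟨fa', hfa'⟩ : ∃ fa', fuelA = F.length + fa' := ⟨fuelA - F.length, by omega⟩
    have hAeq : pvARun k fuelA vis F =
        pvARun k fa' (F.foldl pvLS (vis, [])).1
          ([] ++ (F.foldl pvLS (vis, [])).2) := by
      conv_lhs => rw [show F = F ++ [] from (List.append_nil F).symm, hfa']
      exact pvARun_level k F hFk [] vis fa'
    obtain ⟨new, q1, q2, q3, q4, q5, q6, q7, q8⟩ := pvALevel i hi F vis [] hl hF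
    have hnew2 : (F.foldl pvLS (vis, [])).2 = new := by rw [q1, List.nil_append]
    rcases pvBLevelLemma k i hi hkR F vis [] V hl hiff hVR hF hkV with
      ⟨⟨c0, hc0, hkc0⟩, hBnone⟩ | ⟨hknot, V', eB, hiff', hVR', hmem'⟩
    · -- k is generated at this level: both return i+1
      have hkgen : pvRd (F.foldl pvLS (vis, [])).1 k ≠ -1 :=
        q7 k (List.mem_flatMap.2 ⟨c0, hc0, hkc0⟩) hkR
      have hkvis : pvRd vis k = -1 := by
        by_contra h
        exact hkV ((hiff k hkR).1 h)
      have hknew : k ∈ new := by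
        rcases (q5 k hkR).1 hkgen with h | h
        · exact absurd hkvis h
        · exact h
      have hkval : pvRd (F.foldl pvLS (vis, [])).1 k = i + 1 := (q3 k hknew).2.1
      obtain ⟨pre, post, hsplit⟩ := List.append_of_mem hknew
      have hprelen : pre.length + 1 ≤ new.length := by
        rw [hsplit]; simp; try omega
      have hnewN : new.length ≤ N := by omega
      refine ⟨i + 1, ?_, ?_⟩
      · rw [hAeq, List.nil_append, hnew2, hsplit]
        exact pvARun_popUntil k (i + 1) (by omega) pre post
          (F.foldl pvLS (vis, [])).1 fa' hkR.1 hkval (by omega)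
      · rw [hBunfold, pvBLevel_eq, hBnone]
    · -- k not generated: recurse (or the whole range is covered — impossible)
      rcases eq_or_ne new ([] : List Int) with hnil | hnnil
      · -- nothing generated: V is closed, so k ∈ V — contradiction
        exfalso
        have hVclosed : ∀ x ∈ V, ∀ y ∈ [x - 1, x + 1, x * 2], pvR y → y ∈ V := by
          intro x hx y hy hyR
          by_cases hxF : x ∈ F
          · have := q7 y (List.mem_flatMap.2 ⟨x, hxF, hy⟩) hyR
            rcases (q5 y hyR).1 this with h | h
            · exact (hiff y hyR).1 h
            · rw [hnil] at h; simp at h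
          · exact hclosed x hx hxF y hy hyR
        obtain ⟨c0, hc0⟩ : ∃ c0, c0 ∈ F := by
          cases F with
          | nil => exact absurd rfl hFne
          | cons a t => exact ⟨a, List.mem_cons_self⟩
        exact hkV (pvClosed V c0 (hFV c0 hc0) (hF c0 hc0).1 hVclosed k hkR)
      · -- recurse at level i+1
        have hm1 : 1 ≤ new.length := by
          cases new with
          | nil => exact absurd rfl hnnil
          | cons a t => simp
        have hmN : new.length ≤ N := by omega
        have hknewvis : pvRd vis k = -1 := by
          by_contra h
          exact hkV ((hiff k hkR).1 h)
        have hknew : k ∉ new := by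
          intro h
          exact hknot _ (List.mem_flatMap.1 (q8 k h)).choose_spec.1
            ((List.mem_flatMap.1 (q8 k h)).choose_spec.2)
        have hkV' : k ∉ V' := by
          intro h
          rcases (hmem' k).1 h with h | ⟨_, _, h2⟩
          · exact hkV h
          · rcases (q5 k hkR).1 h2 with h | h
            · exact absurd hknewvis h
            · exact hknew h
        have hclosed' : ∀ x ∈ V', x ∉ new → ∀ y ∈ [x - 1, x + 1, x * 2], pvR y → y ∈ V' := by
          intro x hx hxnew y hy hyR
          have hxV : x ∈ V := by
            rcases (hmem' x).1 hx with h | ⟨hxR, h1, h2⟩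
            · exact h
            · rcases (q5 x hxR).1 h2 with h | h
              · exact absurd h1 h
              · exact absurd h hxnew
          by_cases hxF : x ∈ F
          · have := q7 y (List.mem_flatMap.2 ⟨x, hxF, hy⟩) hyR
            exact (hiff' y hyR).1 this
          · have := hclosed x hxV hxF y hy hyR
            exact (hmem' y).2 (Or.inl this)
        have hF' : ∀ c ∈ new, pvR c ∧ pvRd (F.foldl pvLS (vis, [])).1 c = i + 1 := by
          intro c hc
          exact ⟨(q3 c hc).1, (q3 c hc).2.1⟩
        have hcnt' : (F.foldl pvLS (vis, [])).1.count (-1) ≤ N - new.length := by omega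
        obtain ⟨r, eA, eB2⟩ := ihN (N - new.length) (by omega) new
          (F.foldl pvLS (vis, [])).1 V' (i + 1) fa' fb
          (by rw [q2, hl]) hiff' hVR' hnnil hF' hkV' (by omega) hclosed' hcnt'
          (by omega) (by omega)
        refine ⟨r, ?_, ?_⟩
        · rw [hAeq, List.nil_append, hnew2]; exact eA
        · rw [hBunfold, pvBLevel_eq, eB, hnew2]
          exact eB2


-- ===== bridges: executable ports ↔ list models =====
theorem pvAGetD (a : Array Int) (i : Nat) (d : Int) : a.getD i d = a.toList.getD i d := by
  rw [List.getD_eq_getElem?_getD, Array.getElem?_toList]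
  unfold Array.getD
  by_cases h : i < a.size
  · simp [h]
  · simp [h]

theorem pvAFoldX (cur : Int) (hcur : 0 ≤ cur) (ys : List Int) :
    ∀ (vis : Array Int) (br : List Int), (∀ c ∈ br, 0 ≤ c) →
      ((ys.foldl (pvAStepX cur) (vis, br)).1.toList
          = (ys.foldl (pvAStep cur) (vis.toList, [])).1) ∧
      ((ys.foldl (pvAStepX cur) (vis, br)).2
          = (ys.foldl (pvAStep cur) (vis.toList, [])).2.reverse ++ br) ∧
      (∀ c ∈ (ys.foldl (pvAStepX cur) (vis, br)).2, 0 ≤ c) := by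
  induction ys with
  | nil => intro vis br hbr; exact ⟨rfl, rfl, hbr⟩
  | cons y t ih =>
    intro vis br hbr
    rw [List.foldl_cons, List.foldl_cons, pvAStep_mk]
    by_cases hg : 0 ≤ y ∧ y < 100001 ∧ PySem.List.pyGetD vis.toList y (-2) = -1
    · have hgX : 0 ≤ y ∧ y < 100001 ∧ vis.getD y.toNat (-2) = -1 := by
        refine ⟨hg.1, hg.2.1, ?_⟩
        rw [pvAGetD, ← pvGetD_nonneg vis.toList (y : Int) (-2) hg.1]
        exact hg.2.2
      have hstepX : pvAStepX cur (vis, br) y =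
          (vis.setIfInBounds y.toNat (vis.getD cur.toNat (-2) + 1), y :: br) := by
        unfold pvAStepX; rw [if_pos hgX]
      rw [hstepX, if_pos hg, PySem.List.pySetD_of_nonneg _ _ hg.1, List.nil_append]
      have hval : vis.getD cur.toNat (-2) = PySem.List.pyGetD vis.toList cur (-2) := by
        rw [pvAGetD, pvGetD_nonneg vis.toList cur (-2) hcur]
      have htl : (vis.setIfInBounds y.toNat (vis.getD cur.toNat (-2) + 1)).toList
          = vis.toList.set y.toNat (PySem.List.pyGetD vis.toList cur (-2) + 1) := by
        rw [Array.toList_setIfInBounds, hval]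
      have hfac := pvFoldFactor (pvAStep cur) (pvAStep_factor cur) t
        (vis.toList.set y.toNat (PySem.List.pyGetD vis.toList cur (-2) + 1)) [y]
      obtain ⟨ih1, ih2, ih3⟩ := ih (vis.setIfInBounds y.toNat (vis.getD cur.toNat (-2) + 1))
        (y :: br) (by
          intro c hc
          rcases List.mem_cons.1 hc with rfl | hc'
          · exact hg.1
          · exact hbr c hc')
      rw [hfac]
      refine ⟨?_, ?_, ih3⟩
      · rw [ih1, htl]
      · rw [ih2, htl]
        simp
    · have hgX : ¬ (0 ≤ y ∧ y < 100001 ∧ vis.getD y.toNat (-2) = -1) := by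
        intro ⟨h1, h2, h3⟩
        exact hg ⟨h1, h2, by rw [pvGetD_nonneg vis.toList (y : Int) (-2) h1, ← pvAGetD]; exact h3⟩
      have hstepX : pvAStepX cur (vis, br) y = (vis, br) := by
        unfold pvAStepX; rw [if_neg hgX]
      rw [hstepX, if_neg hg]
      exact ih vis br hbr

theorem pvARunX_eq (k : Int) : ∀ (fuel : Nat) (vis : Array Int) (front back : List Int),
    (∀ c ∈ front, 0 ≤ c) → (∀ c ∈ back, 0 ≤ c) →
    pvARunX k fuel vis front back = pvARun k fuel vis.toList (front ++ back.reverse) := by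
  intro fuel
  induction fuel with
  | zero => intro vis front back _ _; rfl
  | succ f ih =>
    intro vis front back hf hb
    cases front with
    | cons cur rest =>
      have hc : 0 ≤ cur := hf cur List.mem_cons_self
      rw [List.cons_append, pvARun_succ]
      show (if cur = k then some (vis.getD cur.toNat (-2))
        else pvARunX k f ([cur - 1, cur + 1, cur * 2].foldl (pvAStepX cur) (vis, back)).1 rest
          ([cur - 1, cur + 1, cur * 2].foldl (pvAStepX cur) (vis, back)).2) = _
      by_cases hck : cur = k
      · rw [if_pos hck, if_pos hck, pvGetD_nonneg _ _ _ hc, pvAGetD]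
      · rw [if_neg hck, if_neg hck]
        obtain ⟨e1, e2, e3⟩ := pvAFoldX cur hc [cur - 1, cur + 1, cur * 2] vis back hb
        have e1' : ([cur - 1, cur + 1, cur * 2].foldl (pvAStepX cur) (vis, back)).1.toList
            = (pvLS (vis.toList, []) cur).1 := e1
        have e2' : ([cur - 1, cur + 1, cur * 2].foldl (pvAStepX cur) (vis, back)).2
            = (pvLS (vis.toList, []) cur).2.reverse ++ back := e2
        rw [ih _ rest _ (fun c hcm => hf c (List.mem_cons_of_mem _ hcm)) e3]
        rw [e1', e2', pvLS_factor cur vis.toList (rest ++ back.reverse)]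
        show pvARun k f (pvLS (vis.toList, []) cur).1
            (rest ++ ((pvLS (vis.toList, []) cur).2.reverse ++ back).reverse) =
          pvARun k f (pvLS (vis.toList, []) cur).1
            ((rest ++ back.reverse) ++ (pvLS (vis.toList, []) cur).2)
        simp [List.append_assoc]
    | nil =>
      cases hbr : back.reverse with
      | nil =>
        have hb0 : back = [] := List.reverse_eq_nil_iff.1 hbr
        subst hb0
        rfl
      | cons cur rest =>
        have hrev : ∀ c ∈ back.reverse, 0 ≤ c := by
          intro c hc
          exact hb c (List.mem_reverse.1 hc)
        have hc : 0 ≤ cur := hrev cur (by rw [hbr]; exact List.mem_cons_self)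
        have hrest : ∀ c ∈ rest, 0 ≤ c := by
          intro c hc
          exact hrev c (by rw [hbr]; exact List.mem_cons_of_mem _ hc)
        have hX : pvARunX k (f + 1) vis [] back =
            (if cur = k then some (vis.getD cur.toNat (-2))
              else pvARunX k f ([cur - 1, cur + 1, cur * 2].foldl (pvAStepX cur) (vis, [])).1 rest
                ([cur - 1, cur + 1, cur * 2].foldl (pvAStepX cur) (vis, [])).2) := by
          show (match back.reverse with
            | [] => none
            | cur :: rest =>
              if cur = k then some (vis.getD cur.toNat (-2))
              else
                let s := [cur - 1, cur + 1, cur * 2].foldl (pvAStepX cur) (vis, [])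
                pvARunX k f s.1 rest s.2) = _
          rw [hbr]
        rw [hX, List.nil_append, pvARun_succ]
        by_cases hck : cur = k
        · rw [if_pos hck, if_pos hck, pvGetD_nonneg _ _ _ hc, pvAGetD]
        · rw [if_neg hck, if_neg hck]
          obtain ⟨e1, e2, e3⟩ := pvAFoldX cur hc [cur - 1, cur + 1, cur * 2] vis [] (by intro c hc; simp at hc)
          have e1' : ([cur - 1, cur + 1, cur * 2].foldl (pvAStepX cur) (vis, [])).1.toList
              = (pvLS (vis.toList, []) cur).1 := e1
          have e2' : ([cur - 1, cur + 1, cur * 2].foldl (pvAStepX cur) (vis, [])).2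
              = (pvLS (vis.toList, []) cur).2.reverse ++ [] := e2
          rw [ih _ rest _ hrest e3]
          rw [e1', e2', pvLS_factor cur vis.toList rest]
          show pvARun k f (pvLS (vis.toList, []) cur).1
              (rest ++ ((pvLS (vis.toList, []) cur).2.reverse ++ []).reverse) =
            pvARun k f (pvLS (vis.toList, []) cur).1
              (rest ++ (pvLS (vis.toList, []) cur).2)
          simp

theorem pvBStepX_mk (k y : Int) (V : Std.HashSet Int) (nxt : List Int) :
    pvBStepX k (some (V, nxt)) y =
      if 0 ≤ y ∧ y < 100001 ∧ ¬ V.contains y then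
        (if y = k then none else some (V.insert y, y :: nxt))
      else some (V, nxt) := rfl

theorem pvBStepX_none (k y : Int) : pvBStepX k none y = none := rfl

theorem pvBFoldX_none (k : Int) (l : List Int) : l.foldl (pvBStepX k) none = none := by
  induction l with
  | nil => rfl
  | cons y t ih => rw [List.foldl_cons, pvBStepX_none]; exact ih

theorem pvBLevelFoldX_none (k : Int) (F : List Int) :
    F.foldl (fun st x => [x - 1, x + 1, x * 2].foldl (pvBStepX k) st) none = none := by
  induction F with
  | nil => rfl
  | cons c t ih =>
    rw [List.foldl_cons, pvBFoldX_none]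
    exact ih

theorem pvBFoldX (k : Int) (ys : List Int) :
    ∀ (HS : Std.HashSet Int) (V : PySem.Set Int) (g : List Int),
    (∀ z : Int, HS.contains z = true ↔ z ∈ V) →
    ((ys.foldl (pvBStepX k) (some (HS, g.reverse)) = none ∧
        ys.foldl (pvBStep k) (some (V, g)) = none) ∨
      (∃ (HS' : Std.HashSet Int) (V' : PySem.Set Int) (g' : List Int),
        ys.foldl (pvBStepX k) (some (HS, g.reverse)) = some (HS', g'.reverse) ∧
        ys.foldl (pvBStep k) (some (V, g)) = some (V', g') ∧
        (∀ z : Int, HS'.contains z = true ↔ z ∈ V'))) := by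
  induction ys with
  | nil => intro HS V g hrel; exact Or.inr ⟨HS, V, g, rfl, rfl, hrel⟩
  | cons y t ih =>
    intro HS V g hrel
    rw [List.foldl_cons, List.foldl_cons, pvBStepX_mk, pvBStep_mk]
    by_cases hg : 0 ≤ y ∧ y < 100001 ∧ ¬ (y ∈ V)
    · have hgX : 0 ≤ y ∧ y < 100001 ∧ ¬ HS.contains y = true := by
        refine ⟨hg.1, hg.2.1, ?_⟩
        intro hcon
        exact hg.2.2 ((hrel y).1 hcon)
      rw [if_pos hg, if_pos hgX]
      by_cases hyk : y = k
      · rw [if_pos hyk, if_pos hyk, pvBFoldX_none, pvBFold_none]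
        exact Or.inl ⟨rfl, rfl⟩
      · rw [if_neg hyk, if_neg hyk]
        have hrel' : ∀ z : Int, (HS.insert y).contains z = true ↔ z ∈ PySem.Set.add V y := by
          intro z
          rw [Std.HashSet.contains_insert, PySem.Set.mem_add]
          simp only [Bool.or_eq_true, beq_iff_eq]
          constructor
          · rintro (h | h)
            · exact Or.inr h.symm
            · exact Or.inl ((hrel z).1 h)
          · rintro (h | h)
            · exact Or.inr ((hrel z).2 h)
            · exact Or.inl h.symm
        rw [show y :: g.reverse = (g ++ [y]).reverse by simp]
        exact ih (HS.insert y) (PySem.Set.add V y) (g ++ [y]) hrel'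
    · have hgX : ¬ (0 ≤ y ∧ y < 100001 ∧ ¬ HS.contains y = true) := by
        intro ⟨h1, h2, h3⟩
        exact hg ⟨h1, h2, fun hm => h3 ((hrel y).2 hm)⟩
      rw [if_neg hg, if_neg hgX]
      exact ih HS V g hrel

theorem pvBLevelFoldX (k : Int) (F : List Int) :
    ∀ (HS : Std.HashSet Int) (V : PySem.Set Int) (g : List Int),
    (∀ z : Int, HS.contains z = true ↔ z ∈ V) →
    ((F.foldl (fun st x => [x - 1, x + 1, x * 2].foldl (pvBStepX k) st) (some (HS, g.reverse)) = none ∧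
        F.foldl (pvBLS k) (some (V, g)) = none) ∨
      (∃ (HS' : Std.HashSet Int) (V' : PySem.Set Int) (g' : List Int),
        F.foldl (fun st x => [x - 1, x + 1, x * 2].foldl (pvBStepX k) st) (some (HS, g.reverse))
          = some (HS', g'.reverse) ∧
        F.foldl (pvBLS k) (some (V, g)) = some (V', g') ∧
        (∀ z : Int, HS'.contains z = true ↔ z ∈ V'))) := by
  induction F with
  | nil => intro HS V g hrel; exact Or.inr ⟨HS, V, g, rfl, rfl, hrel⟩
  | cons c F' ih =>
    intro HS V g hrel
    have hx1 : (c :: F').foldl (fun st x => [x - 1, x + 1, x * 2].foldl (pvBStepX k) st) (some (HS, g.reverse))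
        = F'.foldl (fun st x => [x - 1, x + 1, x * 2].foldl (pvBStepX k) st)
            ([c - 1, c + 1, c * 2].foldl (pvBStepX k) (some (HS, g.reverse))) := rfl
    have hx2 : (c :: F').foldl (pvBLS k) (some (V, g))
        = F'.foldl (pvBLS k) ([c - 1, c + 1, c * 2].foldl (pvBStep k) (some (V, g))) := rfl
    rw [hx1, hx2]
    rcases pvBFoldX k [c - 1, c + 1, c * 2] HS V g hrel with
      ⟨e1, e2⟩ | ⟨HS1, V1, g1, e1, e2, hrel1⟩
    · rw [e1, e2, pvBLevelFoldX_none, pvBLSFold_none]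
      exact Or.inl ⟨rfl, rfl⟩
    · rw [e1, e2]
      exact ih HS1 V1 g1 hrel1

theorem pvBLoopX_eq (k : Int) : ∀ (fuel : Nat) (HS : Std.HashSet Int) (V : PySem.Set Int)
    (F : List Int) (step : Int),
    (∀ z : Int, HS.contains z = true ↔ z ∈ V) →
    pvBLoopX k fuel HS F step = pvBLoop k fuel V F step := by
  intro fuel
  induction fuel with
  | zero => intro _ _ _ _ _; rfl
  | succ f ih =>
    intro HS V F step hrel
    by_cases hF : F = []
    · subst hF
      show (if ([] : List Int) = [] then some (-1 : Int) else _)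
        = (if ([] : List Int) = [] then some (-1 : Int) else _)
      rw [if_pos rfl, if_pos rfl]
    · have hX : pvBLoopX k (f + 1) HS F step =
          match pvBLevelX k HS F with
          | none => some (step + 1)
          | some (V', nxt) => pvBLoopX k f V' nxt.reverse (step + 1) := by
        show (if F = [] then some (-1) else _) = _
        rw [if_neg hF]
      have hG : pvBLoop k (f + 1) V F step =
          match pvBLevel k V F with
          | none => some (step + 1)
          | some (V', nxt) => pvBLoop k f V' nxt (step + 1) := by
        show (if F = [] then some (-1) else _) = _
        rw [if_neg hF]
      rw [hX, hG]
      rcases pvBLevelFoldX k F HS V [] hrel with ⟨e1, e2⟩ | ⟨HS1, V1, g1, e1, e2, hrel1⟩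
      · simp only [List.reverse_nil] at e1
        rw [show pvBLevelX k HS F
            = F.foldl (fun st x => [x - 1, x + 1, x * 2].foldl (pvBStepX k) st) (some (HS, [])) from rfl, e1]
        rw [pvBLevel_eq, e2]
      · simp only [List.reverse_nil] at e1
        rw [show pvBLevelX k HS F
            = F.foldl (fun st x => [x - 1, x + 1, x * 2].foldl (pvBStepX k) st) (some (HS, [])) from rfl, e1]
        rw [pvBLevel_eq, e2]
        show pvBLoopX k f HS1 g1.reverse.reverse (step + 1) = pvBLoop k f V1 g1 (step + 1)
        rw [List.reverse_reverse]
        exact ih HS1 V1 g1 (step + 1) hrel1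

-- ===== VERDICT (by name: the statement is the Claim_ definition above) =====
theorem bfs_spec : Claim_equal_bfs := by
  intro n k _ hpre
  obtain ⟨hn0, hn1, hk0, hk1⟩ := hpre
  unfold Spec_bfs bfs bfs_alt
  have hntoNat : n.toNat < 100001 := by omega
  have hAX : pvARunX k 600013 ((Array.replicate 100001 (-1)).setIfInBounds n.toNat 0) [n] []
      = pvARun k 600013 ((List.replicate 100001 (-1 : Int)).set n.toNat 0) [n] := by
    rw [pvARunX_eq k 600013 ((Array.replicate 100001 (-1)).setIfInBounds n.toNat 0) [n] []
      (by
        intro c hc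
        rcases List.mem_singleton.1 hc with rfl
        exact hn0)
      (by intro c hc; simp at hc)]
    rw [Array.toList_setIfInBounds, Array.toList_replicate, List.reverse_nil, List.append_nil]
  have hBX : pvBLoopX k 200005 (Std.HashSet.emptyWithCapacity.insert n) [n] 0
      = pvBLoop k 200005 (PySem.Set.ofList [n]) [n] 0 := by
    apply pvBLoopX_eq
    intro z
    rw [Std.HashSet.contains_insert, Std.HashSet.contains_emptyWithCapacity, PySem.Set.mem_ofList,
      Bool.or_false, beq_iff_eq, List.mem_singleton]
    exact ⟨fun h => h.symm, fun h => h.symm⟩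
  have hrd0 : pvRd ((List.replicate 100001 (-1 : Int)).set n.toNat 0) n = 0 :=
    pvRd_set_self _ n 0 hn0 (by rw [List.length_replicate]; omega)
  by_cases hnk : n = k
  · rw [if_pos hnk]
    subst hnk
    rw [hAX]
    rw [show (600013 : Nat) = 600012 + 1 from rfl, pvARun_succ, if_pos rfl]
    rw [pvGetD_nonneg _ _ _ hn0, ← pvRd_def, hrd0]
    rfl
  · rw [if_neg hnk]
    have hkR : pvR k := ⟨hk0, by omega⟩
    have hiff0 : ∀ x : Int, pvR x →
        (pvRd ((List.replicate 100001 (-1 : Int)).set n.toNat 0) x ≠ -1 ↔ x ∈ PySem.Set.ofList [n]) := by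
      intro x hx
      rw [PySem.Set.mem_ofList]
      by_cases hxn : x = n
      · subst hxn
        rw [hrd0]
        simp
      · rw [pvRd_set_ne _ x n 0 hx.1 hn0 hxn]
        obtain ⟨hx1, hx2⟩ := hx
        have hxN : x.toNat < 100001 := by omega
        have : pvRd (List.replicate 100001 (-1 : Int)) x = -1 := by
          rw [pvRd_def, List.getD_eq_getElem?_getD, List.getElem?_replicate, if_pos hxN]
          rfl
        rw [this]
        simp [hxn]
    have hVR0 : ∀ x ∈ PySem.Set.ofList [n], pvR x := by
      intro x hx
      rw [PySem.Set.mem_ofList] at hx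
      simp at hx
      subst hx
      exact ⟨hn0, by omega⟩
    have hkV0 : k ∉ PySem.Set.ofList [n] := by
      rw [PySem.Set.mem_ofList]
      simp
      intro e
      exact hnk e.symm
    have hcnt0 : ((List.replicate 100001 (-1 : Int)).set n.toNat 0).count (-1) ≤ 100000 := by
      have hsome : (List.replicate 100001 (-1 : Int))[n.toNat]? = some (-1) := by
        rw [List.getElem?_replicate, if_pos hntoNat]
      have := pvCountSet (List.replicate 100001 (-1)) n.toNat 0 hsome (by omega)
      have hrep : (List.replicate 100001 (-1 : Int)).count (-1) = 100001 := by
        rw [List.count_replicate]; norm_num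
      omega
    obtain ⟨r, eA, eB⟩ := pvOuter k hkR 100000 [n]
      ((List.replicate 100001 (-1 : Int)).set n.toNat 0) (PySem.Set.ofList [n]) 0
      600013 200005
      (by rw [List.length_set, List.length_replicate])
      hiff0 hVR0 (by simp)
      (by
        intro c hc
        simp at hc
        subst hc
        exact ⟨⟨hn0, by omega⟩, hrd0⟩)
      hkV0 le_rfl
      (by
        intro x hx hxF
        rw [PySem.Set.mem_ofList] at hx
        simp at hx hxF
        exact absurd hx hxF)
      hcnt0 (by norm_num) (by norm_num)
    rw [hAX, hBX, eA, eB]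
    rfl
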